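-- pv_equiv track=rewrite | github.com/supersciencegrl/AoC | 2024/day15.py | calculate_gps_sum
-- ===== SOURCE A (Python) =====
-- def calculate_gps_sum(grid: list[str]) -> int:
--     """
--     Calculates the sum of GPS coordinates for boxes ('O') in a grid.
--
--     This function scans a grid to find all positions marked with 'O' and
--     calculates a GPS coordinate for each. The GPS coordinate is calculated
--     as (100 * row_index) + column_index. It then returns the sum of all
--     GPS coordinates.
--
--     Args:
--         grid (list[str]): A list of strings representing the grid, where each
--                           string is a row. The character 'O' represents a box
--                           whose GPS coordinate is to be calculated.
--
--     Returns:
--         int: The sum of all GPS coordinates for the boxes ('O') found in the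
--              grid.
--     """
--     result = 0
--     for y, line in enumerate(grid):
--         for x, posn in enumerate(line):
--             if posn == 'O':
--                 # Calculate GPS coordinate and add it to the running total
--                 gps_coordinate = (100 * y) + x
--                 result += gps_coordinate
--
--     return result
-- ===== SOURCE B (Python) =====
-- def calculate_gps_sum(grid: list[str]) -> int:
--     """Divide-and-conquer: each piece reports (box count, relative GPS sum);
--     pieces combine by shifting the right half's sum with the left half's size."""
--
--     def _row(cs: str) -> tuple[int, int]:
--         # (number of 'O' in cs, sum of their indices within cs)
--         n = len(cs)
--         if n == 0:
--             return (0, 0)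
--         if n == 1:
--             return (1, 0) if cs == 'O' else (0, 0)
--         m = n // 2
--         c1, s1 = _row(cs[:m])
--         c2, s2 = _row(cs[m:])
--         return (c1 + c2, s1 + s2 + m * c2)
--
--     def _rows(g: list[str]) -> tuple[int, int]:
--         # (number of 'O' in g, sum of 100*y + x over them, y relative to g)
--         n = len(g)
--         if n == 0:
--             return (0, 0)
--         if n == 1:
--             return _row(g[0])
--         m = n // 2
--         c1, s1 = _rows(g[:m])
--         c2, s2 = _rows(g[m:])
--         return (c1 + c2, s1 + s2 + 100 * m * c2)
--
--     return _rows(grid)[1]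
-- ===== Notes on version B (the rewrite author's own statement) =====
-- stated objective: alternative
-- what changed: Replaces the index-carrying double scan by a divide-and-conquer over a (count, relative-sum) monoid: halves of a row/grid are solved recursively with no indices at all, and the right half's sum is shifted by the left half's size when the halves are merged.
import Mathlib
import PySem

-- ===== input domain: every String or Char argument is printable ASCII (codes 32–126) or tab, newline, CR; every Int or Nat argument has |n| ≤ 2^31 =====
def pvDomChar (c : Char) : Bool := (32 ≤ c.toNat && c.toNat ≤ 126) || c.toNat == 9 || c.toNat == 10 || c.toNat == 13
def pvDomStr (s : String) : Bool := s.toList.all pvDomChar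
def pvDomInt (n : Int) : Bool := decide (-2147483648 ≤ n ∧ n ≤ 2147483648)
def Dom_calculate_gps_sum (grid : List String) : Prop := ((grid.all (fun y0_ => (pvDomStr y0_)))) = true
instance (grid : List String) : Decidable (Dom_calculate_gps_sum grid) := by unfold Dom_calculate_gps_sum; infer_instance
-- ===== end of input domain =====

-- B replaces A's index-carrying double scan by a divide-and-conquer over a
-- (count, relative-sum) monoid (no indices; halves merge by shifting with the
-- left half's size). Same asymptotics; objective: alternative.

-- ===== PORT A =====
def calculate_gps_sum (grid : List String) : Int :=
  (PySem.List.enumerate grid).foldl (fun result yline =>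
    (PySem.List.enumerate yline.2.toList).foldl (fun r xposn =>
      if xposn.2 = 'O' then r + (100 * yline.1 + xposn.1) else r) result) 0

-- ===== PORT B =====
-- _row: (number of 'O' in cs, sum of their indices within cs); cs[:m]/cs[m:]
-- with 0 ≤ m ≤ len are List.take/List.drop.
def pvRowDC (cs : List Char) : Int × Int :=
  match cs with
  | [] => (0, 0)
  | [c] => if c = 'O' then (1, 0) else (0, 0)
  | c :: c' :: rest =>
    let l := c :: c' :: rest
    let m := l.length / 2
    let p1 := pvRowDC (l.take m)
    let p2 := pvRowDC (l.drop m)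
    (p1.1 + p2.1, p1.2 + p2.2 + (m : Int) * p2.1)
termination_by cs.length
decreasing_by all_goals simp; omega

-- _rows: (number of 'O' in g, sum of 100*y + x over them, y relative to g)
def pvRowsDC (g : List String) : Int × Int :=
  match g with
  | [] => (0, 0)
  | [s] => pvRowDC s.toList
  | s :: s' :: rest =>
    let l := s :: s' :: rest
    let m := l.length / 2
    let p1 := pvRowsDC (l.take m)
    let p2 := pvRowsDC (l.drop m)
    (p1.1 + p2.1, p1.2 + p2.2 + 100 * (m : Int) * p2.1)
termination_by g.length
decreasing_by all_goals simp; omega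

def calculate_gps_sum_alt (grid : List String) : Int :=
  (pvRowsDC grid).2

-- ===== PRECONDITION & SPEC =====
def Spec_calculate_gps_sum (grid : List String) (out : Int) : Prop := out = calculate_gps_sum_alt grid
instance (grid : List String) (out : Int) : Decidable (Spec_calculate_gps_sum grid out) := by unfold Spec_calculate_gps_sum; infer_instance

-- ===== CLAIM (what is proved, stated in full; the proofs are below) =====
def Claim_equal_calculate_gps_sum : Prop := ∀ (grid : List String), Dom_calculate_gps_sum grid → Spec_calculate_gps_sum grid (calculate_gps_sum grid)

-- ===== LEMMAS AND PROOFS =====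

-- number of 'O' in a row
def pvCnt (cs : List Char) : Int := (cs.countP (fun c => c = 'O') : Int)

-- sum of indices of the 'O's in a row
def pvIdx : List Char → Int
  | [] => 0
  | _ :: cs => pvIdx cs + pvCnt cs

-- total count / reference GPS sum of a grid
def pvCntG : List String → Int
  | [] => 0
  | s :: g => pvCnt s.toList + pvCntG g

def pvGps : List String → Int
  | [] => 0
  | s :: g => pvIdx s.toList + (pvGps g + 100 * pvCntG g)

theorem pvCnt_append (a b : List Char) : pvCnt (a ++ b) = pvCnt a + pvCnt b := by
  simp [pvCnt, List.countP_append]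

theorem pvIdx_append (a b : List Char) :
    pvIdx (a ++ b) = pvIdx a + pvIdx b + (a.length : Int) * pvCnt b := by
  induction a with
  | nil => simp [pvIdx]
  | cons c cs ih =>
      simp only [List.cons_append, pvIdx, ih, pvCnt_append, List.length_cons]
      push_cast
      ring

theorem pvRowDC_eq : ∀ (n : Nat) (cs : List Char), cs.length ≤ n →
    pvRowDC cs = (pvCnt cs, pvIdx cs) := by
  intro n
  induction n with
  | zero =>
      intro cs h
      have : cs = [] := List.eq_nil_of_length_eq_zero (by omega)
      subst this; simp [pvRowDC, pvCnt, pvIdx]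
  | succ n ih =>
      intro cs h
      match cs with
      | [] => simp [pvRowDC, pvCnt, pvIdx]
      | [c] =>
          by_cases hc : c = 'O' <;> simp [pvRowDC, pvCnt, pvIdx, hc]
      | c :: c' :: rest =>
          rw [pvRowDC]
          set l := c :: c' :: rest with hl
          set m := l.length / 2 with hm
          have hml : m ≤ l.length := Nat.div_le_self _ _
          have h1 : (l.take m).length ≤ n := by
            simp only [List.length_take]
            have : 2 ≤ l.length := by simp [hl]
            omega
          have h2 : (l.drop m).length ≤ n := by
            simp only [List.length_drop]
            have : 2 ≤ l.length := by simp [hl]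
            have : 1 ≤ m := by
              have : 2 ≤ l.length := by simp [hl]
              omega
            omega
          rw [ih _ h1, ih _ h2]
          have hsplit : l = l.take m ++ l.drop m := (List.take_append_drop m l).symm
          have htl : (l.take m).length = m := by
            simp [List.length_take]; omega
          simp only [Prod.mk.injEq]
          constructor
          · conv_rhs => rw [hsplit]
            rw [pvCnt_append]
          · conv_rhs => rw [hsplit]
            rw [pvIdx_append, htl]

theorem pvCntG_append (a b : List String) : pvCntG (a ++ b) = pvCntG a + pvCntG b := by
  induction a with
  | nil => simp [pvCntG]
  | cons s g ih => simp [pvCntG, ih]; ring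

theorem pvGps_append (a b : List String) :
    pvGps (a ++ b) = pvGps a + pvGps b + 100 * (a.length : Int) * pvCntG b := by
  induction a with
  | nil => simp [pvGps]
  | cons s g ih =>
      simp only [List.cons_append, pvGps, ih, pvCntG_append, List.length_cons]
      push_cast
      ring

theorem pvRowsDC_eq : ∀ (n : Nat) (g : List String), g.length ≤ n →
    pvRowsDC g = (pvCntG g, pvGps g) := by
  intro n
  induction n with
  | zero =>
      intro g h
      have : g = [] := List.eq_nil_of_length_eq_zero (by omega)
      subst this; simp [pvRowsDC, pvCntG, pvGps]
  | succ n ih =>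
      intro g h
      match g with
      | [] => simp [pvRowsDC, pvCntG, pvGps]
      | [s] =>
          rw [pvRowsDC, pvRowDC_eq s.toList.length s.toList le_rfl]
          simp [pvCntG, pvGps]
      | s :: s' :: rest =>
          rw [pvRowsDC]
          set l := s :: s' :: rest with hl
          set m := l.length / 2 with hm
          have h2len : 2 ≤ l.length := by simp [hl]
          have h1 : (l.take m).length ≤ n := by
            simp only [List.length_take]; omega
          have h2 : (l.drop m).length ≤ n := by
            simp only [List.length_drop]
            have : 1 ≤ m := by omega
            omega
          rw [ih _ h1, ih _ h2]
          have hsplit : l = l.take m ++ l.drop m := (List.take_append_drop m l).symm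
          have htl : (l.take m).length = m := by
            simp [List.length_take]
            exact Nat.div_le_self _ _
          simp only [Prod.mk.injEq]
          constructor
          · conv_rhs => rw [hsplit]
            rw [pvCntG_append]
          · conv_rhs => rw [hsplit]
            rw [pvGps_append, htl]

-- ---- A side: characterise the enumerate folds ----

-- reference value of one row of A's inner loop, indices counted from i
def pvRefRow (y : Int) : List Char → Nat → Int
  | [], _ => 0
  | c :: cs, i => (if c = 'O' then 100 * y + (i : Int) else 0) + pvRefRow y cs (i + 1)

theorem rowA_eq_refRow (y : Int) (cs : List Char) (i : Nat) (r : Int) :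
    (PySem.List.enumerate cs (i : Int)).foldl (fun r xposn =>
      if xposn.2 = 'O' then r + (100 * y + xposn.1) else r) r = r + pvRefRow y cs i := by
  induction cs generalizing i r with
  | nil => simp [PySem.List.enumerate_nil, pvRefRow]
  | cons c cs ih =>
      rw [PySem.List.enumerate_cons]
      simp only [List.foldl_cons]
      have h1 : ((i : Int) + 1) = ((i + 1 : Nat) : Int) := by push_cast; ring
      rw [h1, ih]
      by_cases hc : c = 'O' <;> (simp [pvRefRow, hc]; try ring)

theorem refRow_closed (y : Int) (cs : List Char) (i : Nat) :
    pvRefRow y cs i = (100 * y + (i : Int)) * pvCnt cs + pvIdx cs := by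
  induction cs generalizing i with
  | nil => simp [pvRefRow, pvCnt, pvIdx]
  | cons c cs ih =>
      have hcnt : pvCnt (c :: cs) = (if c = 'O' then 1 else 0) + pvCnt cs := by
        by_cases hc : c = 'O' <;> (simp [pvCnt, hc]; try omega)
      simp only [pvRefRow, pvIdx, ih, hcnt]
      by_cases hc : c = 'O' <;> simp only [hc, reduceIte] <;> push_cast <;> ring

theorem rowA_eq_refRow0 (y : Int) (cs : List Char) (r : Int) :
    (PySem.List.enumerate cs).foldl (fun r xposn =>
      if xposn.2 = 'O' then r + (100 * y + xposn.1) else r) r = r + pvRefRow y cs 0 := by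
  simpa using rowA_eq_refRow y cs 0 r

theorem gridA_eq (g : List String) (i : Nat) (r : Int) :
    (PySem.List.enumerate g (i : Int)).foldl (fun result yline =>
      (PySem.List.enumerate yline.2.toList).foldl (fun r xposn =>
        if xposn.2 = 'O' then r + (100 * yline.1 + xposn.1) else r) result) r
    = r + pvGps g + 100 * (i : Int) * pvCntG g := by
  induction g generalizing i r with
  | nil => simp [PySem.List.enumerate_nil, pvGps, pvCntG]
  | cons s g ih =>
      rw [PySem.List.enumerate_cons]
      simp only [List.foldl_cons]
      rw [rowA_eq_refRow0, refRow_closed]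
      have h1 : ((i : Int) + 1) = ((i + 1 : Nat) : Int) := by push_cast; ring
      rw [h1, ih]
      simp only [pvGps, pvCntG]
      push_cast
      ring

-- ===== VERDICT (by name: the statement is the Claim_ definition above) =====
theorem calculate_gps_sum_spec : Claim_equal_calculate_gps_sum := by
  unfold Claim_equal_calculate_gps_sum Spec_calculate_gps_sum
  intro grid _
  unfold calculate_gps_sum calculate_gps_sum_alt
  rw [pvRowsDC_eq grid.length grid le_rfl]
  have h := gridA_eq grid 0 0
  simp only [Nat.cast_zero] at h
  rw [h]
  simp
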